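-- pv_equiv track=rewrite | github.com/syauqiyasman/search_engine_from_scratch | util.py | sorted_merge_posts_and_tfs
-- ===== SOURCE A (Python) =====
-- def sorted_merge_posts_and_tfs(posts_tfs1, posts_tfs2):
--     """
--     Menggabung (merge) dua lists of tuples (doc id, tf) dan mengembalikan
--     hasil penggabungan keduanya (TF perlu diakumulasikan untuk semua tuple
--     dengn doc id yang sama), dengan aturan berikut:
--
--     contoh: posts_tfs1 = [(1, 34), (3, 2), (4, 23)]
--             posts_tfs2 = [(1, 11), (2, 4), (4, 3 ), (6, 13)]
--
--             return   [(1, 34+11), (2, 4), (3, 2), (4, 23+3), (6, 13)]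
--                    = [(1, 45), (2, 4), (3, 2), (4, 26), (6, 13)]
--
--     Parameters
--     ----------
--     list1: List[(Comparable, int)]
--     list2: List[(Comparable, int]
--         Dua buah sorted list of tuples yang akan di-merge.
--
--     Returns
--     -------
--     List[(Comparablem, int)]
--         Penggabungan yang sudah terurut
--     """
--     i, j = 0, 0
--     merge = []
--     while (i < len(posts_tfs1)) and (j < len(posts_tfs2)):
--         if posts_tfs1[i][0] == posts_tfs2[j][0]:
--             freq = posts_tfs1[i][1] + posts_tfs2[j][1]
--             merge.append((posts_tfs1[i][0], freq))
--             i += 1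
--             j += 1
--         elif posts_tfs1[i][0] < posts_tfs2[j][0]:
--             merge.append(posts_tfs1[i])
--             i += 1
--         else:
--             merge.append(posts_tfs2[j])
--             j += 1
--     while i < len(posts_tfs1):
--         merge.append(posts_tfs1[i])
--         i += 1
--     while j < len(posts_tfs2):
--         merge.append(posts_tfs2[j])
--         j += 1
--     return merge
-- ===== SOURCE B (Python) =====
-- def sorted_merge_posts_and_tfs(posts_tfs1, posts_tfs2):
--     rest1 = posts_tfs1[::-1]
--     rest2 = posts_tfs2[::-1]
--     merged = []
--     while rest1 and rest2:
--         (doc1, tf1), (doc2, tf2) = rest1[-1], rest2[-1]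
--         if doc1 == doc2:
--             merged.append((doc1, tf1 + tf2))
--             rest1.pop()
--             rest2.pop()
--         elif doc1 < doc2:
--             merged.append(rest1.pop())
--         else:
--             merged.append(rest2.pop())
--     merged.extend(reversed(rest1))
--     merged.extend(reversed(rest2))
--     return merged
-- ===== Notes on version B (the rewrite author's own statement) =====
-- stated objective: alternative
-- what changed: Replaces the index bookkeeping (i, j and three separate while-loops over list positions) by consuming reversed working copies with O(1) pops from the end, one loop plus two extends; equal to A on every input, no precondition.
import Mathlib
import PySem

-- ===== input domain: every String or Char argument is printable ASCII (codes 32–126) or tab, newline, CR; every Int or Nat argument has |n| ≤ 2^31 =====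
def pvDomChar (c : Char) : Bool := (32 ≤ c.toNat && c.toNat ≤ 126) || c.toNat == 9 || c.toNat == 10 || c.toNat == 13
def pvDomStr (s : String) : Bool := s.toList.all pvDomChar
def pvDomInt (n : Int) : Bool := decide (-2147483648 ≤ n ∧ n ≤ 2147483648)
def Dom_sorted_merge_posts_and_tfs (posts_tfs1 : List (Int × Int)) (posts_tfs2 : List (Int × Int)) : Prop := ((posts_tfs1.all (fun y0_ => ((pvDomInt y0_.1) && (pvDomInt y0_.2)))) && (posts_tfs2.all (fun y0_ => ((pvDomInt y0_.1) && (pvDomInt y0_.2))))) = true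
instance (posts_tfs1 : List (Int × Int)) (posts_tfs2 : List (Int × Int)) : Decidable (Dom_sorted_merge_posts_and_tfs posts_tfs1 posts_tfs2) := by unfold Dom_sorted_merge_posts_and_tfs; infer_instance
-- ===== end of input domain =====

-- B re-decomposes A's merge: instead of indices i, j and three while-loops, it consumes
-- reversed working copies with pops from the end (one loop plus two extends); same result.

-- ===== PORT A =====
-- A's while-loop over indices i, j; the two trailing while-loops each append the remaining
-- suffix element by element, transcribed here as appending the drops (one of them is empty).
def pvMergeLoopA (l1 l2 : List (Int × Int)) (i j : Nat) (merge : List (Int × Int)) :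
    List (Int × Int) :=
  if h : i < l1.length ∧ j < l2.length then
    if (l1[i]'h.1).1 == (l2[j]'h.2).1 then
      pvMergeLoopA l1 l2 (i+1) (j+1) (merge ++ [((l1[i]'h.1).1, (l1[i]'h.1).2 + (l2[j]'h.2).2)])
    else if (l1[i]'h.1).1 < (l2[j]'h.2).1 then
      pvMergeLoopA l1 l2 (i+1) j (merge ++ [l1[i]'h.1])
    else
      pvMergeLoopA l1 l2 i (j+1) (merge ++ [l2[j]'h.2])
  else
    (merge ++ l1.drop i) ++ l2.drop j
termination_by (l1.length - i) + (l2.length - j)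
decreasing_by all_goals omega

def sorted_merge_posts_and_tfs (posts_tfs1 : List (Int × Int)) (posts_tfs2 : List (Int × Int)) :
    List (Int × Int) :=
  pvMergeLoopA posts_tfs1 posts_tfs2 0 0 []

-- ===== PORT B =====
-- B's while-loop: rest1/rest2 are the reversed working copies, rest[-1] is getLast?,
-- .pop() is dropLast, and the two extends append the reversed leftovers.
def pvMergeLoopB (rest1 rest2 merged : List (Int × Int)) : List (Int × Int) :=
  if h : rest1 ≠ [] ∧ rest2 ≠ [] then
    if (rest1.getLast h.1).1 == (rest2.getLast h.2).1 then
      pvMergeLoopB rest1.dropLast rest2.dropLast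
        (merged ++ [((rest1.getLast h.1).1, (rest1.getLast h.1).2 + (rest2.getLast h.2).2)])
    else if (rest1.getLast h.1).1 < (rest2.getLast h.2).1 then
      pvMergeLoopB rest1.dropLast rest2 (merged ++ [rest1.getLast h.1])
    else
      pvMergeLoopB rest1 rest2.dropLast (merged ++ [rest2.getLast h.2])
  else
    (merged ++ rest1.reverse) ++ rest2.reverse
termination_by rest1.length + rest2.length
decreasing_by
  all_goals
    have := List.length_pos_of_ne_nil h.1
    have := List.length_pos_of_ne_nil h.2
    simp [List.length_dropLast]
    omega

def sorted_merge_posts_and_tfs_alt (posts_tfs1 : List (Int × Int)) (posts_tfs2 : List (Int × Int)) :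
    List (Int × Int) :=
  pvMergeLoopB posts_tfs1.reverse posts_tfs2.reverse []

-- ===== PRECONDITION & SPEC =====
def Spec_sorted_merge_posts_and_tfs (posts_tfs1 : List (Int × Int)) (posts_tfs2 : List (Int × Int)) (out : List (Int × Int)) : Prop := out = sorted_merge_posts_and_tfs_alt posts_tfs1 posts_tfs2
instance (posts_tfs1 : List (Int × Int)) (posts_tfs2 : List (Int × Int)) (out : List (Int × Int)) : Decidable (Spec_sorted_merge_posts_and_tfs posts_tfs1 posts_tfs2 out) := by unfold Spec_sorted_merge_posts_and_tfs; infer_instance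

-- ===== CLAIM (what is proved, stated in full; the proofs are below) =====
def Claim_equal_sorted_merge_posts_and_tfs : Prop := ∀ (posts_tfs1 : List (Int × Int)) (posts_tfs2 : List (Int × Int)), Dom_sorted_merge_posts_and_tfs posts_tfs1 posts_tfs2 → Spec_sorted_merge_posts_and_tfs posts_tfs1 posts_tfs2 (sorted_merge_posts_and_tfs posts_tfs1 posts_tfs2)

-- ===== LEMMAS AND PROOFS =====

-- the common structural reading of both loops: merge by cases on the heads
def pvMergeF : List (Int × Int) → List (Int × Int) → List (Int × Int)
  | [], l2 => l2
  | l1, [] => l1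
  | a :: t1, b :: t2 =>
    if a.1 = b.1 then (a.1, a.2 + b.2) :: pvMergeF t1 t2
    else if a.1 < b.1 then a :: pvMergeF t1 (b :: t2)
    else b :: pvMergeF (a :: t1) t2

lemma pvMergeF_nil_right (l : List (Int × Int)) : pvMergeF l [] = l := by
  cases l <;> simp [pvMergeF]

lemma pvMergeLoopA_eq (l1 l2 : List (Int × Int)) (i j : Nat) (m : List (Int × Int)) :
    pvMergeLoopA l1 l2 i j m = m ++ pvMergeF (l1.drop i) (l2.drop j) := by
  fun_induction pvMergeLoopA l1 l2 i j m with
  | case1 i j m h hb ih =>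
    rw [ih, List.drop_eq_getElem_cons h.1, List.drop_eq_getElem_cons h.2]
    simp only [pvMergeF, if_pos (by exact_mod_cast (beq_iff_eq.mp hb)), List.append_assoc,
      List.singleton_append]
  | case2 i j m h hb hlt ih =>
    rw [ih, List.drop_eq_getElem_cons h.1, List.drop_eq_getElem_cons h.2]
    rw [show pvMergeF (l1[i] :: l1.drop (i+1)) (l2[j] :: l2.drop (j+1)) =
      l1[i] :: pvMergeF (l1.drop (i+1)) (l2[j] :: l2.drop (j+1)) by
        simp only [pvMergeF, if_neg (by simpa using hb), if_pos hlt]]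
    rw [← List.drop_eq_getElem_cons h.2]
    simp
  | case3 i j m h hb hlt ih =>
    rw [ih, List.drop_eq_getElem_cons h.1, List.drop_eq_getElem_cons h.2]
    rw [show pvMergeF (l1[i] :: l1.drop (i+1)) (l2[j] :: l2.drop (j+1)) =
      l2[j] :: pvMergeF (l1[i] :: l1.drop (i+1)) (l2.drop (j+1)) by
        simp only [pvMergeF, if_neg (by simpa using hb), if_neg hlt]]
    rw [← List.drop_eq_getElem_cons h.1]
    simp
  | case4 i j m h =>
    rcases Nat.lt_or_ge i l1.length with hi | hi
    · have hj : l2.length ≤ j := by omega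
      rw [List.drop_eq_nil_of_le hj, pvMergeF_nil_right]
      simp
    · rw [List.drop_eq_nil_of_le hi]
      simp [pvMergeF]

lemma pvMergeLoopB_eq (r1 r2 m : List (Int × Int)) :
    pvMergeLoopB r1 r2 m = m ++ pvMergeF r1.reverse r2.reverse := by
  fun_induction pvMergeLoopB r1 r2 m with
  | case1 r1 r2 m h hb ih =>
    rw [ih]
    rw [show r1.reverse = r1.getLast h.1 :: r1.dropLast.reverse by
      conv_lhs => rw [← List.dropLast_append_getLast h.1]
      simp]
    rw [show r2.reverse = r2.getLast h.2 :: r2.dropLast.reverse by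
      conv_lhs => rw [← List.dropLast_append_getLast h.2]
      simp]
    simp only [pvMergeF, if_pos (by exact_mod_cast (beq_iff_eq.mp hb)), List.append_assoc,
      List.singleton_append]
  | case2 r1 r2 m h hb hlt ih =>
    rw [ih]
    rw [show r1.reverse = r1.getLast h.1 :: r1.dropLast.reverse by
      conv_lhs => rw [← List.dropLast_append_getLast h.1]
      simp]
    rw [show r2.reverse = r2.getLast h.2 :: r2.dropLast.reverse by
      conv_lhs => rw [← List.dropLast_append_getLast h.2]
      simp]
    rw [show pvMergeF (r1.getLast h.1 :: r1.dropLast.reverse)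
        (r2.getLast h.2 :: r2.dropLast.reverse) =
      r1.getLast h.1 :: pvMergeF r1.dropLast.reverse (r2.getLast h.2 :: r2.dropLast.reverse) by
        simp only [pvMergeF, if_neg (by simpa using hb), if_pos hlt]]
    simp
  | case3 r1 r2 m h hb hlt ih =>
    rw [ih]
    rw [show r1.reverse = r1.getLast h.1 :: r1.dropLast.reverse by
      conv_lhs => rw [← List.dropLast_append_getLast h.1]
      simp]
    rw [show r2.reverse = r2.getLast h.2 :: r2.dropLast.reverse by
      conv_lhs => rw [← List.dropLast_append_getLast h.2]
      simp]
    rw [show pvMergeF (r1.getLast h.1 :: r1.dropLast.reverse)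
        (r2.getLast h.2 :: r2.dropLast.reverse) =
      r2.getLast h.2 :: pvMergeF (r1.getLast h.1 :: r1.dropLast.reverse) r2.dropLast.reverse by
        simp only [pvMergeF, if_neg (by simpa using hb), if_neg hlt]]
    simp
  | case4 r1 r2 m h =>
    rcases not_and_or.mp h with h1 | h1
    · rw [not_ne_iff.mp h1]
      simp [pvMergeF]
    · rw [not_ne_iff.mp h1]
      rw [List.reverse_nil, pvMergeF_nil_right]
      simp

-- ===== VERDICT (by name: the statement is the Claim_ definition above) =====
theorem sorted_merge_posts_and_tfs_spec : Claim_equal_sorted_merge_posts_and_tfs := by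
  intro l1 l2 _
  show sorted_merge_posts_and_tfs l1 l2 = sorted_merge_posts_and_tfs_alt l1 l2
  rw [sorted_merge_posts_and_tfs, pvMergeLoopA_eq, sorted_merge_posts_and_tfs_alt,
    pvMergeLoopB_eq]
  simp
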